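-- pv_equiv track=rewrite | github.com/swjungle4a-algorithm/algorithm_study | jack/lv2/짝지어 제거하기.py | solution
-- ===== SOURCE A (Python) =====
-- def solution(s):
--     answer = 0
--     stk = []
--
--     for c in s:
--         if stk and stk[-1] == c:
--             stk.pop()
--             continue
--
--         stk.append(c)
--
--     answer = 0 if stk else 1
--
--     return answer
-- ===== SOURCE B (Python) =====
-- def solution(s):
--     t = list(s)
--     while True:
--         k = -1
--         for i in range(len(t) - 1):
--             if t[i] == t[i + 1]:
--                 k = i
--                 break
--         if k == -1:
--             break
--         t = t[:k] + t[k + 2:]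
--     return 1 if not t else 0
-- ===== Notes on version B (the rewrite author's own statement) =====
-- stated objective: alternative
-- what changed: Replaced the one-pass stack with a repeated-rescan reducer that finds the first adjacent equal pair and deletes it until none remains, returning 1 iff the residue is empty (correct by confluence of adjacent-pair removal).
import Mathlib
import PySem

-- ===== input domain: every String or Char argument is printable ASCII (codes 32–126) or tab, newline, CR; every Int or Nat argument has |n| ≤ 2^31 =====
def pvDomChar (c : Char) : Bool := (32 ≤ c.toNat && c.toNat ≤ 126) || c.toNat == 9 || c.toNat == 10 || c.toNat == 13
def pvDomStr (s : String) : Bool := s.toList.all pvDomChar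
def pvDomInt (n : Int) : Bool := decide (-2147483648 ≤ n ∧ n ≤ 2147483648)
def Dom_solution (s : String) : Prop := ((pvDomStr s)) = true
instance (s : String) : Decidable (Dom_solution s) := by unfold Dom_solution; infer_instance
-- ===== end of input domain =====

-- B replaces A's one-pass stack by a repeated-rescan reducer (delete the first adjacent
-- equal pair until none remains); same result by confluence of adjacent-pair removal.

-- ===== PORT A =====
-- the loop body: pop when the top of the stack equals c, else push c (stack head = top)
def pvStep (stk : List Char) (c : Char) : List Char :=
  match stk with
  | top :: rest => if top == c then rest else c :: top :: rest
  | [] => [c]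

def solution (s : String) : Int :=
  let stk := s.toList.foldl pvStep []
  if stk.isEmpty then 1 else 0

-- ===== PORT B =====
-- index of the first adjacent equal pair (Source B's inner for-loop), none if there is none
def pvFindPair : List Char → Option Nat
  | a :: b :: rest => if a == b then some 0 else (pvFindPair (b :: rest)).map (· + 1)
  | _ => none

theorem pvFindPair_le (t : List Char) (k : Nat) (h : pvFindPair t = some k) :
    k + 2 ≤ t.length := by
  induction t generalizing k with
  | nil => simp [pvFindPair] at h
  | cons a t ih =>
    match t with
    | [] => simp [pvFindPair] at h
    | b :: rest =>
      by_cases hab : a == b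
      · simp [pvFindPair, hab] at h
        simp only [List.length_cons]
        omega
      · simp [pvFindPair, hab] at h
        obtain ⟨k', hk', hkk⟩ := h
        have := ih k' hk'
        simp only [List.length_cons] at this ⊢
        omega

-- Source B's while-loop: delete the first adjacent equal pair until none remains
def pvReduce (t : List Char) : List Char :=
  match h : pvFindPair t with
  | some k => pvReduce (t.take k ++ t.drop (k + 2))
  | none => t
termination_by t.length
decreasing_by
  have := pvFindPair_le t k h
  simp
  omega

def solution_alt (s : String) : Int :=
  if (pvReduce s.toList).isEmpty then 1 else 0

-- ===== PRECONDITION & SPEC =====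
def Spec_solution (s : String) (out : Int) : Prop := out = solution_alt s
instance (s : String) (out : Int) : Decidable (Spec_solution s out) := by unfold Spec_solution; infer_instance

-- ===== CLAIM (what is proved, stated in full; the proofs are below) =====
def Claim_equal_solution : Prop := ∀ (s : String), Dom_solution s → Spec_solution s (solution s)

-- ===== LEMMAS AND PROOFS =====

theorem pvReduce_some {t : List Char} {k : Nat} (h : pvFindPair t = some k) :
    pvReduce t = pvReduce (t.take k ++ t.drop (k + 2)) := by
  rw [pvReduce]; split <;> simp_all

theorem pvReduce_none {t : List Char} (h : pvFindPair t = none) :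
    pvReduce t = t := by
  rw [pvReduce]; split <;> simp_all

-- the stack never holds two equal adjacent elements
theorem step_chain (stk : List Char) (c : Char)
    (h : List.IsChain (· ≠ ·) stk) : List.IsChain (· ≠ ·) (pvStep stk c) := by
  match stk with
  | [] => exact List.isChain_singleton c
  | top :: rest =>
    by_cases htc : top == c
    · simpa [pvStep, htc] using h.tail
    · simp only [pvStep, htc, Bool.false_eq_true, if_false]
      refine List.isChain_cons_cons.mpr ⟨?_, h⟩
      have : top ≠ c := by simpa using htc
      exact fun he => this he.symm

-- processing two equal chars in a row is the identity on a chain-stack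
theorem step_step (stk : List Char) (c : Char) (h : List.IsChain (· ≠ ·) stk) :
    pvStep (pvStep stk c) c = stk := by
  match stk with
  | [] => simp [pvStep]
  | top :: rest =>
    by_cases htc : top == c
    · have hc : top = c := by simpa using htc
      subst hc
      have h1 : pvStep (top :: rest) top = rest := by simp [pvStep]
      rw [h1]
      match rest with
      | [] => simp [pvStep]
      | u :: v =>
        have hu : top ≠ u := List.rel_of_isChain_cons_cons h
        have hf : (u == top) = false := by
          simp only [beq_eq_false_iff_ne]
          exact fun e => hu e.symm
        simp [pvStep, hf]
    · simp [pvStep, htc]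

theorem foldl_pair (xs : List Char) : ∀ (stk : List Char) (c : Char) (ys : List Char),
    List.IsChain (· ≠ ·) stk →
    (xs ++ c :: c :: ys).foldl pvStep stk = (xs ++ ys).foldl pvStep stk := by
  induction xs with
  | nil =>
    intro stk c ys h
    simp only [List.nil_append, List.foldl_cons, step_step stk c h]
  | cons a xs ih =>
    intro stk c ys h
    simp only [List.cons_append, List.foldl_cons]
    exact ih _ c ys (step_chain stk a h)

theorem findPair_none_chain : ∀ (t : List Char), pvFindPair t = none →
    List.IsChain (· ≠ ·) t := by
  intro t
  induction t with
  | nil => intro _; exact List.isChain_nil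
  | cons a t ih =>
    match t with
    | [] => intro _; exact List.isChain_singleton a
    | b :: rest =>
      intro h
      by_cases hab : a == b
      · simp [pvFindPair, hab] at h
      · simp [pvFindPair, hab] at h
        exact List.isChain_cons_cons.mpr ⟨by simpa using hab, ih h⟩

-- a pair-free string is pushed wholesale
theorem foldl_nopair : ∀ (t stk : List Char), List.IsChain (· ≠ ·) t →
    (∀ x, stk.head? = some x → t.head? ≠ some x) →
    t.foldl pvStep stk = t.reverse ++ stk := by
  intro t
  induction t with
  | nil => intro stk _ _; simp
  | cons c t ih =>
    intro stk hch hhd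
    have hstep : pvStep stk c = c :: stk := by
      match stk with
      | [] => simp [pvStep]
      | top :: rest =>
        have : top ≠ c := by
          intro he; exact hhd top rfl (by simp [he])
        simp [pvStep, beq_iff_eq, this]
    have hrec : t.foldl pvStep (c :: stk) = t.reverse ++ c :: stk := by
      refine ih (c :: stk) hch.tail ?_
      intro x hx ht
      match t, hch with
      | u :: v, hch =>
        simp at hx ht
        subst hx
        exact List.rel_of_isChain_cons_cons hch (by simpa using ht.symm)
    simp [List.foldl_cons, hstep, hrec]

-- the split behind a found pair
theorem findPair_split : ∀ (t : List Char) (k : Nat), pvFindPair t = some k →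
    ∃ xs c ys, t = xs ++ c :: c :: ys ∧ xs.length = k := by
  intro t
  induction t with
  | nil => intro k h; simp [pvFindPair] at h
  | cons a t ih =>
    match t with
    | [] => intro k h; simp [pvFindPair] at h
    | b :: rest =>
      intro k h
      by_cases hab : a == b
      · simp [pvFindPair, hab] at h
        have hb : a = b := by simpa using hab
        exact ⟨[], a, rest, by simp [hb], by simp [← h]⟩
      · simp [pvFindPair, hab] at h
        obtain ⟨k', hk', hkk⟩ := h
        obtain ⟨xs, c, ys, heq, hlen⟩ := ih k' hk'
        exact ⟨a :: xs, c, ys, by simp [heq], by simp [hlen, ← hkk]⟩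

theorem foldl_reduce : ∀ (t : List Char),
    (pvReduce t).foldl pvStep [] = t.foldl pvStep [] := by
  intro t
  induction t using pvReduce.induct with
  | case1 t k h ih =>
    rw [pvReduce_some h]
    rw [ih]
    obtain ⟨xs, c, ys, heq, hlen⟩ := findPair_split t k h
    subst heq
    have htake : (xs ++ c :: c :: ys).take k = xs := by
      rw [← hlen]; simp
    have hdrop : (xs ++ c :: c :: ys).drop (k + 2) = ys := by
      have h1 : (xs ++ c :: c :: ys).drop k = c :: c :: ys := by
        rw [← hlen]; simp
      have h2 : (xs ++ c :: c :: ys).drop (k + 2) =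
          ((xs ++ c :: c :: ys).drop k).drop 2 := by
        rw [List.drop_drop]
      rw [h2, h1]; rfl
    rw [htake, hdrop]
    exact (foldl_pair xs [] c ys List.isChain_nil).symm
  | case2 t h => rw [pvReduce_none h]

theorem findPair_reduce (t : List Char) : pvFindPair (pvReduce t) = none := by
  induction t using pvReduce.induct with
  | case1 t k h ih => rw [pvReduce_some h]; exact ih
  | case2 t h => rw [pvReduce_none h]; exact h

theorem reduce_empty_iff (t : List Char) :
    t.foldl pvStep [] = [] ↔ pvReduce t = [] := by
  rw [← foldl_reduce t]
  have hch := findPair_none_chain _ (findPair_reduce t)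
  rw [foldl_nopair (pvReduce t) [] hch (by simp)]
  simp

-- ===== VERDICT (by name: the statement is the Claim_ definition above) =====
theorem solution_spec : Claim_equal_solution := by
  intro s _
  unfold Spec_solution solution solution_alt
  simp only [List.isEmpty_iff]
  by_cases h : s.toList.foldl pvStep [] = []
  · rw [if_pos h, if_pos ((reduce_empty_iff _).mp h)]
  · rw [if_neg h, if_neg (fun hc => h ((reduce_empty_iff _).mpr hc))]
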